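-- pv_equiv track=rewrite | github.com/sravez/dauphine | Info/code/EXTP/TP/TP2/EX_2.19.py | s2
-- ===== SOURCE A (Python) =====
-- def s2(n: int) -> int:
--     s = 0
--     red = 1
--     while red <=6:
--         green = 1
--         while green <= 8:
--             if(0 < n - red - green < 11):
--                 s +=1
--             green +=1
--         red += 1
--     return s
-- ===== SOURCE B (Python) =====
-- def s2(n: int) -> int:
--     s = 0
--     for red in range(1, 7):
--         lo = max(1, n - red - 10)
--         hi = min(8, n - red - 1)
--         s += max(0, hi - lo + 1)
--     return s
-- ===== Notes on version B (the rewrite author's own statement) =====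
-- stated objective: simpler
-- what changed: Replaced the inner green loop with closed-form counting of the integer interval [max(1,n-red-10), min(8,n-red-1)], keeping a single loop over red.
import Mathlib
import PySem

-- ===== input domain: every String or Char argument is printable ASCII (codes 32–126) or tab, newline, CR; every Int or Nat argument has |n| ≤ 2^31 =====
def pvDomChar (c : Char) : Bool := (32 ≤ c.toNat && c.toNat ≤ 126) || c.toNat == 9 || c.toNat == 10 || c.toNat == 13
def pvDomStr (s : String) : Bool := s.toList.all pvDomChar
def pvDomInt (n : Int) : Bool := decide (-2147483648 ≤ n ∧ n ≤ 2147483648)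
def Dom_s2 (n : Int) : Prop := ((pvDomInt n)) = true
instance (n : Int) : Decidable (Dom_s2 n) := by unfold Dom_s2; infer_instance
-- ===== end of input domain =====

-- B replaces the inner green loop by a closed-form interval count; objective: simpler.

-- ===== PORT A =====
-- nested while loops: red = 1..6, green = 1..8, count when 0 < n-red-green < 11
def s2 (n : Int) : Int :=
  (PySem.List.pyRange 1 7 1).foldl (fun s red =>
    (PySem.List.pyRange 1 9 1).foldl (fun s green =>
      if 0 < n - red - green ∧ n - red - green < 11 then s + 1 else s) s) 0

-- ===== PORT B =====
def s2_alt (n : Int) : Int :=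
  (PySem.List.pyRange 1 7 1).foldl (fun s red =>
    s + max 0 (min 8 (n - red - 1) - max 1 (n - red - 10) + 1)) 0

-- ===== PRECONDITION & SPEC =====
def Spec_s2 (n : Int) (out : Int) : Prop := out = s2_alt n
instance (n : Int) (out : Int) : Decidable (Spec_s2 n out) := by unfold Spec_s2; infer_instance

-- ===== CLAIM (what is proved, stated in full; the proofs are below) =====
def Claim_equal_s2 : Prop := ∀ (n : Int), Dom_s2 n → Spec_s2 n (s2 n)

-- ===== LEMMAS AND PROOFS =====

theorem foldl_count_shift (P : Int → Prop) [DecidablePred P] (l : List Int) (s : Int) :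
    l.foldl (fun s g => if P g then s + 1 else s) s
      = s + l.foldl (fun s g => if P g then s + 1 else s) 0 := by
  induction l generalizing s with
  | nil => simp
  | cons x t ih =>
    simp only [List.foldl_cons]
    rw [ih, @ih (if P x then 0 + 1 else 0)]
    split_ifs <;> omega

theorem foldl_count_zero (P : Int → Prop) [DecidablePred P] (l : List Int)
    (h : ∀ g ∈ l, ¬ P g) (s : Int) :
    l.foldl (fun s g => if P g then s + 1 else s) s = s := by
  induction l generalizing s with
  | nil => rfl
  | cons x t ih =>
    simp only [List.foldl_cons]
    rw [if_neg (h x (by simp))]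
    exact ih (fun g hg => h g (by simp [hg])) s

theorem inner_closed (n red s : Int) :
    (PySem.List.pyRange 1 9 1).foldl (fun s green =>
      if 0 < n - red - green ∧ n - red - green < 11 then s + 1 else s) s
    = s + max 0 (min 8 (n - red - 1) - max 1 (n - red - 10) + 1) := by
  rw [show PySem.List.pyRange 1 9 1 = [1, 2, 3, 4, 5, 6, 7, 8] from by decide]
  rw [foldl_count_shift (fun g => 0 < n - red - g ∧ n - red - g < 11)]
  generalize n - red = m
  have key : (([1, 2, 3, 4, 5, 6, 7, 8] : List Int)).foldl
      (fun s g => if 0 < m - g ∧ m - g < 11 then s + 1 else s) 0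
      = max 0 (min 8 (m - 1) - max 1 (m - 10) + 1) := by
    rcases lt_or_ge m 2 with h1 | h1
    · rw [foldl_count_zero (fun g => 0 < m - g ∧ m - g < 11)
        _ (by intro g hg; fin_cases hg <;> omega)]
      omega
    · rcases lt_or_ge m 20 with h2 | h2
      · interval_cases m <;> decide
      · rw [foldl_count_zero (fun g => 0 < m - g ∧ m - g < 11)
          _ (by intro g hg; fin_cases hg <;> omega)]
        omega
  rw [key]

-- ===== VERDICT (by name: the statement is the Claim_ definition above) =====
theorem s2_spec : Claim_equal_s2 := by
  intro n _
  unfold Spec_s2 s2 s2_alt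
  simp only [inner_closed]
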